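-- pv_equiv track=rewrite | github.com/DDR7707/Final-450-with-Python | Stacks and Queues/331.Min sum squares after removal of k chars.py | minStringValue
-- ===== SOURCE A (Python) =====
-- from queue import PriorityQueue
--
-- MAX_CHAR = 26
--
-- def minStringValue(str, k):
--     l = len(str) # find length of string
--
--     # if K is greater than length of string
--     # so reduced string will become 0
--     if(k >= l):
--         return 0
--
--     # Else find Frequency of each
--     # character and store in an array
--     frequency = [0] * MAX_CHAR
--     for i in range(0, l):
--         frequency[ord(str[i]) - 97] += 1
--
--     # Push each char frequency negative
--     # into a priority_queue as the queue
--     # by default is minheap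
--     q = PriorityQueue()
--     for i in range(0, MAX_CHAR):
--         q.put(-frequency[i])
--
--     # Removal of K characters
--     while(k > 0):
--
--         # Get top element in priority_queue
--         # multiply it by -1 as temp is negative
--         # remove it. Increment by 1 and again
--         # push into priority_queue
--         temp = q.get()
--         temp = temp + 1
--         q.put(temp, temp)
--         k = k - 1
--
--     # After removal of K characters find
--     # sum of squares of string Value
--     result = 0; # initialize result
--     while not q.empty():
--         temp = q.get()
--         temp = temp * (-1)
--         result += temp * temp
--     return result
-- ===== SOURCE B (Python) =====
-- def minStringValue(str, k):
--     l = len(str)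
--     if k >= l:
--         return 0
--     frequency = [0] * 26
--     for c in str:
--         frequency[ord(c) - 97] += 1
--     if k <= 0:
--         return sum(f * f for f in frequency)
--     # Greedy removal = water-filling: find the smallest level L such that
--     # lowering every bucket above L down to L removes at most k characters.
--     def excess(L):
--         return sum(f - L for f in frequency if f > L)
--     lo, hi = 0, max(frequency)
--     while lo < hi:
--         mid = (lo + hi) // 2
--         if excess(mid) <= k:
--             hi = mid
--         else:
--             lo = mid + 1
--     L = lo
--     r = k - excess(L)                      # extra removals taken from buckets sitting at level L
--     m = sum(1 for f in frequency if f >= L)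
--     return sum(f * f for f in frequency if f < L) + r * (L - 1) ** 2 + (m - r) * L ** 2
-- ===== Notes on version B (the rewrite author's own statement) =====
-- stated objective: faster
-- what changed: A removes the k characters one by one from a priority queue (k heap get/put operations); B finds the final water-fill level of the 26 frequency buckets by binary search on the removal-excess function and computes the answer in closed form from that level.
-- outside the precondition, e.g. on minStringValue('ab!', 1): A raises IndexError, B raises IndexError
import Mathlib
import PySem

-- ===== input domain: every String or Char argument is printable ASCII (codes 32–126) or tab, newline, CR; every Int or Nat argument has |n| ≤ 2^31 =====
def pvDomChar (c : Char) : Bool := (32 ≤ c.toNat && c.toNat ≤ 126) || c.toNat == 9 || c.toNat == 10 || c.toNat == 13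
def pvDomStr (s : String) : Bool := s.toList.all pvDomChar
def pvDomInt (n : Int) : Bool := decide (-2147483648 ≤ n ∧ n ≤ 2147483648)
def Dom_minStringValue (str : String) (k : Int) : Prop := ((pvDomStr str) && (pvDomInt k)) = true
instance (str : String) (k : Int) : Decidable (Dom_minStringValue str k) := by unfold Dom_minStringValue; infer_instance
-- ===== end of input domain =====

-- B replaces A's k single-character heap removals with a binary search for the final
-- water-fill level of the 26 frequency buckets (objective: faster removal phase).

-- ===== PORT A =====
-- Counting loop shared by both ports (both Pythons run `frequency[ord(c)-97] += 1` over the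
-- characters; A indexes `str[i]` for i in range(0,l), which visits exactly the characters in
-- order).  Exact via pyGet?/pySet?: `none` = IndexError (ord(c)-97 outside [-26,25]).
def pvCountStep (acc : Option (List Int)) (c : Char) : Option (List Int) :=
  match acc with
  | none => none
  | some frequency =>
    match PySem.List.pyGet? frequency ((c.toNat : Int) - 97) with
    | none => none
    | some v => PySem.List.pySet? frequency ((c.toNat : Int) - 97) (v + 1)

def pvCount (cs : List Char) : Option (List Int) :=
  cs.foldl pvCountStep (some (List.replicate 26 (0 : Int)))

-- PriorityQueue of ints modelled as an ascending sorted list: put = ordered insert,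
-- get = head (the minimum).  Only the stored values matter for A's result.
def pvPut (x : Int) (q : List Int) : List Int := List.orderedInsert (· ≤ ·) x q

-- while(k > 0): temp = q.get(); q.put(temp + 1); k -= 1
def pvRemoveLoop : Nat → List Int → List Int
  | 0, q => q
  | n + 1, q =>
    match q with
    | [] => []          -- unreachable: the queue always holds 26 entries
    | t :: rest => pvRemoveLoop n (pvPut (t + 1) rest)

-- while not q.empty(): temp = q.get() * (-1); result += temp * temp
def pvDrain : List Int → Int → Int
  | [], result => result
  | t :: rest, result => pvDrain rest (result + (t * -1) * (t * -1))

def minStringValue (str : String) (k : Int) : Int :=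
  let l := PySem.Str.len str
  if k ≥ l then 0
  else
    match pvCount str.toList with
    | none => 0        -- IndexError: excluded by Pre_minStringValue
    | some frequency =>
      let q := frequency.foldl (fun q f => pvPut (-f) q) []
      pvDrain (pvRemoveLoop k.toNat q) 0

-- ===== PORT B =====
-- sum(f - L for f in frequency if f > L): characters removed when every bucket above L
-- is levelled down to L.
def pvExcess (frequency : List Int) (L : Int) : Int :=
  ((frequency.filter (fun f => L < f)).map (fun f => f - L)).sum

-- while lo < hi: mid = (lo+hi)//2; if excess(mid) <= k: hi = mid else lo = mid+1
-- (ported with a fuel counter: hi - lo only ever shrinks, so (hi-lo).toNat steps suffice)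
def pvBsearchGo (frequency : List Int) (k : Int) : Nat → Int → Int → Int
  | 0, lo, _ => lo
  | n + 1, lo, hi =>
    if lo < hi then
      if pvExcess frequency (PySem.Int.floordiv (lo + hi) 2) ≤ k then
        pvBsearchGo frequency k n lo (PySem.Int.floordiv (lo + hi) 2)
      else
        pvBsearchGo frequency k n (PySem.Int.floordiv (lo + hi) 2 + 1) hi
    else lo

def pvBsearch (frequency : List Int) (k lo hi : Int) : Int :=
  pvBsearchGo frequency k (hi - lo).toNat lo hi

def minStringValue_alt (str : String) (k : Int) : Int :=
  let l := PySem.Str.len str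
  if k ≥ l then 0
  else
    match pvCount str.toList with
    | none => 0        -- IndexError: excluded by Pre_minStringValue
    | some frequency =>
      if k ≤ 0 then (frequency.map (fun f => f * f)).sum
      else
        -- max(frequency): the list is non-empty (26 buckets), so the default is never used
        let L := pvBsearch frequency k 0 ((PySem.List.max? frequency (fun f => f)).getD 0)
        let r := k - pvExcess frequency L
        let m : Int := (frequency.countP (fun f => L ≤ f) : Int)
        ((frequency.filter (fun f => f < L)).map (fun f => f * f)).sum
          + r * (L - 1) ^ 2 + (m - r) * L ^ 2

-- ===== PRECONDITION & SPEC =====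
-- Pre_ excludes exactly the inputs where A raises IndexError: k < len(str) and some character
-- with ord outside [71,122] ('G'..'z'), for which frequency[ord(c)-97] is out of range.
-- (B's counting loop is identical and raises on exactly the same inputs.)
def Pre_minStringValue (str : String) (k : Int) : Prop :=
  PySem.Str.len str ≤ k ∨ (str.toList.all (fun c => 71 ≤ c.toNat && c.toNat ≤ 122)) = true
instance (str : String) (k : Int) : Decidable (Pre_minStringValue str k) := by
  unfold Pre_minStringValue; infer_instance

def pvWitness_minStringValue : String × Int := ("aabc", 2)

def Spec_minStringValue (str : String) (k : Int) (out : Int) : Prop := out = minStringValue_alt str k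
instance (str : String) (k : Int) (out : Int) : Decidable (Spec_minStringValue str k out) := by unfold Spec_minStringValue; infer_instance

-- ===== CLAIM (what is proved, stated in full; the proofs are below) =====
def Claim_equal_minStringValue : Prop := ∀ (str : String) (k : Int), Dom_minStringValue str k → Pre_minStringValue str k → Spec_minStringValue str k (minStringValue str k)

-- ===== LEMMAS AND PROOFS =====

-- removals needed to bring every bucket down to level L, as a sum of maxima
def pvS (frequency : List Int) (L : Int) : Int :=
  (frequency.map (fun f => max (f - L) 0)).sum

-- number of buckets at level ≥ L
def pvM (frequency : List Int) (L : Int) : Nat :=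
  frequency.countP (fun f => L ≤ f)

-- the multiset of bucket values after j greedy max-removals, where pvS L + r = j, r < pvM L:
-- buckets below L untouched, r levelled buckets already lowered to L-1, the rest at L
def pvE (frequency : List Int) (L : Int) (r : Nat) : Multiset Int :=
  Multiset.filter (fun f => f < L) (frequency : Multiset Int)
    + Multiset.replicate (pvM frequency L - r) L + Multiset.replicate r (L - 1)

-- loop invariant of A's removal loop after j removals
def pvInv (frequency : List Int) (j : Nat) (q : List Int) : Prop :=
  ∃ (L : Int) (r : Nat), 1 ≤ L ∧ r < pvM frequency L ∧ pvS frequency L + r = j ∧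
    q.Pairwise (· ≤ ·) ∧ (q : Multiset Int) = (pvE frequency L r).map (fun x => -x)

theorem pvExcess_eq_S (frequency : List Int) (L : Int) :
    pvExcess frequency L = pvS frequency L := by
  induction frequency with
  | nil => rfl
  | cons f t ih =>
    simp only [pvExcess, pvS, List.filter_cons, List.map_cons, List.sum_cons] at *
    by_cases h : L < f
    · simp [h, ih]; omega
    · simp [h, ih]; omega

theorem pvS_antitone (frequency : List Int) {L L' : Int} (h : L ≤ L') :
    pvS frequency L' ≤ pvS frequency L := by
  induction frequency with
  | nil => simp [pvS]
  | cons f t ih =>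
    simp only [pvS, List.map_cons, List.sum_cons] at *
    have : max (f - L') 0 ≤ max (f - L) 0 := by omega
    omega

theorem pvS_pred (frequency : List Int) (L : Int) :
    pvS frequency (L - 1) = pvS frequency L + (pvM frequency L : Int) := by
  induction frequency with
  | nil => simp [pvS, pvM]
  | cons f t ih =>
    simp only [pvS, pvM, List.map_cons, List.sum_cons, List.countP_cons] at *
    by_cases h : L ≤ f
    · simp [h]; omega
    · simp [h]; omega

theorem pvS_zero (frequency : List Int) (h : ∀ f ∈ frequency, 0 ≤ f) :
    pvS frequency 0 = frequency.sum := by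
  induction frequency with
  | nil => rfl
  | cons f t ih =>
    simp only [pvS, List.map_cons, List.sum_cons] at *
    have h0 := h f (by simp)
    have := ih (fun x hx => h x (by simp [hx]))
    omega

theorem pvS_top (frequency : List Int) {M : Int} (h : ∀ f ∈ frequency, f ≤ M) :
    pvS frequency M = 0 := by
  induction frequency with
  | nil => rfl
  | cons f t ih =>
    simp only [pvS, List.map_cons, List.sum_cons] at *
    have h0 := h f (by simp)
    have := ih (fun x hx => h x (by simp [hx]))
    omega

-- the characterisation (level, remainder) of a removal count is unique
theorem pvLevel_unique (frequency : List Int) {L1 L2 r1 r2 : Int}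
    (h1 : 0 ≤ r1) (h1' : r1 < (pvM frequency L1 : Int))
    (h2 : 0 ≤ r2) (h2' : r2 < (pvM frequency L2 : Int))
    (he : pvS frequency L1 + r1 = pvS frequency L2 + r2) :
    L1 = L2 ∧ r1 = r2 := by
  have p1 := pvS_pred frequency L1
  have p2 := pvS_pred frequency L2
  rcases lt_trichotomy L1 L2 with h | h | h
  · have := pvS_antitone frequency (show L1 ≤ L2 - 1 by omega)
    omega
  · subst h; omega
  · have := pvS_antitone frequency (show L2 ≤ L1 - 1 by omega)
    omega

theorem pvStep_some {acc acc' : List Int} {c : Char}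
    (h : pvCountStep (some acc) c = some acc') :
    acc'.length = acc.length ∧ acc'.sum = acc.sum + 1 ∧
      ((∀ f ∈ acc, 0 ≤ f) → ∀ f ∈ acc', 0 ≤ f) := by
  unfold pvCountStep at h
  set i : Int := (c.toNat : Int) - 97 with hi
  cases hg : PySem.List.pyGet? acc i with
  | none => simp [hg] at h
  | some v =>
    simp only [hg] at h
    unfold PySem.List.pyGet? at hg
    unfold PySem.List.pySet? at h
    cases hj : PySem.List.pyIdx? acc.length i with
    | none => simp [hj] at h
    | some j =>
      simp only [hj, Option.map_some, Option.some.injEq] at h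
      simp only [hj, Option.bind_some] at hg
      subst h
      obtain ⟨hjlt, hvj⟩ := List.getElem?_eq_some_iff.mp hg
      refine ⟨by simp, ?_, ?_⟩
      · have hsplit : acc = acc.take j ++ acc[j] :: acc.drop (j + 1) := by
          conv_lhs => rw [← List.take_append_drop j acc]
          rw [List.drop_eq_getElem_cons hjlt]
        rw [List.sum_set]
        conv_rhs => rw [hsplit]
        rw [List.sum_append, List.sum_cons, hvj]
        simp only [hjlt, if_pos]
        ring
      · intro hpos f hf
        rcases List.mem_or_eq_of_mem_set hf with hmem | rfl
        · exact hpos f hmem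
        · have := hpos acc[j] (List.getElem_mem hjlt)
          omega

theorem pvCount_aux (cs : List Char) :
    ∀ (acc frequency : List Int), cs.foldl pvCountStep (some acc) = some frequency →
      (∀ f ∈ acc, 0 ≤ f) →
      frequency.length = acc.length ∧ (∀ f ∈ frequency, 0 ≤ f) ∧
        frequency.sum = acc.sum + cs.length := by
  induction cs with
  | nil => intro acc f h hp; simp_all
  | cons c t ih =>
    intro acc f h hp
    simp only [List.foldl_cons] at h
    cases hs : pvCountStep (some acc) c with
    | none =>
      rw [hs] at h
      exfalso
      have : ∀ (l : List Char), l.foldl pvCountStep none = none := by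
        intro l; induction l with
        | nil => rfl
        | cons a b ihb => simpa [pvCountStep] using ihb
      simp [this] at h
    | some acc' =>
      rw [hs] at h
      obtain ⟨hl, hsum, hpos⟩ := pvStep_some hs
      obtain ⟨hl', hpos', hsum'⟩ := ih acc' f h (hpos hp)
      refine ⟨by omega, hpos', by simp [hsum', hsum]; omega⟩

theorem pvCount_spec (cs : List Char) (frequency : List Int)
    (h : pvCount cs = some frequency) :
    frequency.length = 26 ∧ (∀ f ∈ frequency, 0 ≤ f) ∧ frequency.sum = cs.length := by
  obtain ⟨h1, h2, h3⟩ := pvCount_aux cs (List.replicate 26 0) frequency h (by simp)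
  refine ⟨by simpa using h1, h2, by simpa using h3⟩

theorem pvBuild_sorted_aux (frequency : List Int) :
    ∀ (q : List Int), q.Pairwise (· ≤ ·) →
      (frequency.foldl (fun q f => pvPut (-f) q) q).Pairwise (· ≤ ·) := by
  induction frequency with
  | nil => intro q h; simpa using h
  | cons f t ih =>
    intro q h
    exact ih _ (List.Pairwise.orderedInsert (-f) q h)

theorem pvBuild_sorted (frequency : List Int) :
    (frequency.foldl (fun q f => pvPut (-f) q) []).Pairwise (· ≤ ·) :=
  pvBuild_sorted_aux frequency [] (by simp)

theorem pvBuild_perm_aux (frequency : List Int) :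
    ∀ (q : List Int), (frequency.foldl (fun q f => pvPut (-f) q) q).Perm
      (q ++ frequency.map (fun f => -f)) := by
  induction frequency with
  | nil => intro q; simp
  | cons f t ih =>
    intro q
    simp only [List.foldl_cons, List.map_cons]
    refine (ih (pvPut (-f) q)).trans ?_
    have h1 : (pvPut (-f) q).Perm (-f :: q) := List.perm_orderedInsert _ _ _
    refine (h1.append_right _).trans ?_
    exact List.perm_middle.symm

theorem pvBuild_perm (frequency : List Int) :
    (frequency.foldl (fun q f => pvPut (-f) q) []).Perm
      (frequency.map (fun f => -f)) := by
  simpa using pvBuild_perm_aux frequency []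

theorem pvDrain_eq (q : List Int) (acc : Int) :
    pvDrain q acc = acc + (q.map (fun t => t * t)).sum := by
  induction q generalizing acc with
  | nil => simp [pvDrain]
  | cons t rest ih =>
    simp only [pvDrain, List.map_cons, List.sum_cons, ih]
    ring

theorem pvBsearchGo_spec (frequency : List Int) (k : Int) :
    ∀ (n : Nat) (lo hi : Int), (hi - lo).toNat ≤ n → 0 ≤ lo → lo ≤ hi →
      pvS frequency hi ≤ k → (lo = 0 ∨ k < pvS frequency (lo - 1)) →
      0 ≤ pvBsearchGo frequency k n lo hi ∧
      pvS frequency (pvBsearchGo frequency k n lo hi) ≤ k ∧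
      (pvBsearchGo frequency k n lo hi = 0 ∨
        k < pvS frequency (pvBsearchGo frequency k n lo hi - 1)) := by
  intro n
  induction n with
  | zero =>
    intro lo hi hfuel h0 hle hhi hlo
    have : lo = hi := by omega
    subst this
    exact ⟨h0, hhi, hlo⟩
  | succ n ih =>
    intro lo hi hfuel h0 hle hhi hlo
    by_cases h : lo < hi
    · rw [pvBsearchGo, if_pos h]
      have hmid := PySem.Int.floordiv_two_mid_bounds (le_of_lt h)
      have hdiv := PySem.Int.floordiv_eq_ediv_of_pos (a := lo + hi) (b := 2) (by omega)
      by_cases hle2 : pvExcess frequency (PySem.Int.floordiv (lo + hi) 2) ≤ k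
      · rw [if_pos hle2]
        exact ih lo _ (by omega) h0 (by omega) (by rwa [pvExcess_eq_S] at hle2) hlo
      · rw [if_neg hle2]
        rw [pvExcess_eq_S] at hle2
        exact ih _ hi (by omega) (by omega) (by omega) hhi
          (Or.inr (by simpa using lt_of_not_ge hle2))
    · rw [pvBsearchGo, if_neg h]
      have : lo = hi := by omega
      subst this
      exact ⟨h0, hhi, hlo⟩

theorem pvBsearch_spec (frequency : List Int) (k : Int) :
    ∀ lo hi, 0 ≤ lo → lo ≤ hi → pvS frequency hi ≤ k →
      (lo = 0 ∨ k < pvS frequency (lo - 1)) →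
      0 ≤ pvBsearch frequency k lo hi ∧
      pvS frequency (pvBsearch frequency k lo hi) ≤ k ∧
      (pvBsearch frequency k lo hi = 0 ∨ k < pvS frequency (pvBsearch frequency k lo hi - 1)) := by
  intro lo hi h0 hle hhi hlo
  exact pvBsearchGo_spec frequency k (hi - lo).toNat lo hi (le_refl _) h0 hle hhi hlo

theorem pvCountP_pred (t : List Int) (L : Int) :
    t.countP (fun f => decide (L - 1 ≤ f)) = t.countP (fun f => decide (L ≤ f)) + t.count (L - 1) := by
  induction t with
  | nil => simp
  | cons f t ih =>
    rw [List.countP_cons, List.countP_cons, List.count_cons, ih]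
    simp only [decide_eq_true_eq, beq_iff_eq]
    split_ifs <;> omega

theorem pvCountP_top (t : List Int) (M : Int) (htop : ∀ f ∈ t, f ≤ M) :
    t.countP (fun f => decide (M ≤ f)) = t.count M := by
  induction t with
  | nil => simp
  | cons f t ih =>
    rw [List.countP_cons, List.count_cons, ih (fun x hx => htop x (by simp [hx]))]
    have := htop f (by simp)
    simp only [decide_eq_true_eq, beq_iff_eq]
    split_ifs <;> omega

theorem pvM_pred (frequency : List Int) (L : Int) :
    pvM frequency (L - 1) = pvM frequency L + frequency.count (L - 1) := by
  unfold pvM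
  exact pvCountP_pred frequency L

theorem pvE_le (frequency : List Int) (L : Int) (r : Nat) {x : Int}
    (hx : x ∈ pvE frequency L r) : x ≤ L := by
  unfold pvE at hx
  rcases Multiset.mem_add.mp hx with hx | hx
  · rcases Multiset.mem_add.mp hx with hx | hx
    · have := Multiset.of_mem_filter hx; omega
    · have := Multiset.eq_of_mem_replicate hx; omega
  · have := Multiset.eq_of_mem_replicate hx; omega

theorem pvE_mem_L (frequency : List Int) (L : Int) {r : Nat}
    (hr : r < pvM frequency L) : L ∈ pvE frequency L r := by
  unfold pvE
  refine Multiset.mem_add.mpr (Or.inl (Multiset.mem_add.mpr (Or.inr ?_)))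
  exact Multiset.mem_replicate.mpr ⟨by omega, rfl⟩

-- erase one bucket from level L and re-add it at L-1 : one more removal
theorem pvE_step (frequency : List Int) (L : Int) (r : Nat) (hr : r < pvM frequency L) :
    (L - 1) ::ₘ (pvE frequency L r).erase L = pvE frequency L (r + 1) := by
  unfold pvE
  ext x
  rw [Multiset.count_cons]
  by_cases hxL : x = L
  · rw [hxL, Multiset.count_erase_self]
    simp only [Multiset.count_add, Multiset.count_filter, Multiset.count_replicate]
    split_ifs <;> omega
  · rw [Multiset.count_erase_of_ne hxL]
    simp only [Multiset.count_add, Multiset.count_filter, Multiset.count_replicate]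
    split_ifs <;> omega

-- when every levelled bucket has reached L-1, the state is the base state of level L-1
theorem pvE_shift (frequency : List Int) (L : Int) :
    pvE frequency L (pvM frequency L) = pvE frequency (L - 1) 0 := by
  unfold pvE
  ext x
  simp only [Multiset.count_add, Multiset.count_filter, Multiset.count_replicate,
    Nat.sub_self, Nat.sub_zero, Multiset.coe_count]
  rw [pvM_pred]
  by_cases hx1 : x = L - 1
  · rw [hx1]
    split_ifs <;> omega
  · split_ifs <;> omega

theorem pvInv_step (frequency : List Int) (j : Nat) (q : List Int)
    (hpos : ∀ f ∈ frequency, 0 ≤ f)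
    (hlt : (j : Int) + 1 < frequency.sum)
    (hinv : pvInv frequency j q) :
    ∃ t rest, q = t :: rest ∧ pvInv frequency (j + 1) (pvPut (t + 1) rest) := by
  obtain ⟨L, r, hL, hr, hjr, hsort, hms⟩ := hinv
  have hqne : q ≠ [] := by
    intro hq
    have hLq : (-L) ∈ (q : Multiset Int) := by
      rw [hms]
      exact Multiset.mem_map_of_mem _ (pvE_mem_L frequency L hr)
    simp [hq] at hLq
  obtain ⟨t, rest, rfl⟩ := List.exists_cons_of_ne_nil hqne
  refine ⟨t, rest, rfl, ?_⟩
  have hmemL : (-L) ∈ t :: rest := by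
    have : (-L) ∈ ((t :: rest : List Int) : Multiset Int) := by
      rw [hms]; exact Multiset.mem_map_of_mem _ (pvE_mem_L frequency L hr)
    simpa using this
  have hlow : ∀ x ∈ t :: rest, -L ≤ x := by
    intro x hx
    have : x ∈ ((t :: rest : List Int) : Multiset Int) := by simpa using hx
    rw [hms] at this
    obtain ⟨e, he, rfl⟩ := Multiset.mem_map.mp this
    have := pvE_le frequency L r he
    omega
  have ht : t = -L := by
    rcases List.mem_cons.mp hmemL with h | h
    · omega
    · have h1 := (List.pairwise_cons.mp hsort).1 _ h
      have h2 := hlow t (by simp)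
      omega
  subst ht
  have hrest : (rest : Multiset Int) = ((pvE frequency L r).erase L).map (fun x => -x) := by
    have hh : ((-L) ::ₘ (rest : Multiset Int)) = (pvE frequency L r).map (fun x => -x) := by
      simpa using hms
    rw [Multiset.map_erase _ (fun a b => by omega) L]
    rw [← hh, Multiset.erase_cons_head]
  have hsort' : (pvPut (-L + 1) rest).Pairwise (· ≤ ·) :=
    List.Pairwise.orderedInsert _ _ (List.pairwise_cons.mp hsort).2
  have hput_ms : ((pvPut (-L + 1) rest : List Int) : Multiset Int)
      = (-L + 1) ::ₘ (rest : Multiset Int) :=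
    Multiset.coe_eq_coe.mpr (List.perm_orderedInsert _ _ _)
  have hnew : ((pvPut (-L + 1) rest : List Int) : Multiset Int)
      = (pvE frequency L (r + 1)).map (fun x => -x) := by
    rw [hput_ms, hrest, ← pvE_step frequency L r hr]
    rw [Multiset.map_cons]
    congr 1
    omega
  by_cases hcase : r + 1 < pvM frequency L
  · exact ⟨L, r + 1, hL, hcase, by push_cast; omega, hsort', hnew⟩
  · have hrm : r + 1 = pvM frequency L := by omega
    have hsum : pvS frequency (L - 1) = (j : Int) + 1 := by
      rw [pvS_pred]; omega
    have hL2 : 2 ≤ L := by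
      by_contra hc
      have hL1 : L = 1 := by omega
      rw [hL1] at hsum
      simp only [sub_self] at hsum
      rw [pvS_zero frequency hpos] at hsum
      omega
    have hM' : 0 < pvM frequency (L - 1) := by
      rw [pvM_pred]; omega
    refine ⟨L - 1, 0, by omega, hM', ?_, hsort', ?_⟩
    · push_cast; omega
    · rw [hnew, hrm, pvE_shift]

theorem pvRemoveLoop_inv (frequency : List Int) (hpos : ∀ f ∈ frequency, 0 ≤ f) :
    ∀ (n j : Nat) (q : List Int), pvInv frequency j q →
      ((j : Int) + n ≤ frequency.sum - 1) →
      pvInv frequency (j + n) (pvRemoveLoop n q) := by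
  intro n
  induction n with
  | zero => intro j q h _; simpa using h
  | succ n ih =>
    intro j q hinv hle
    obtain ⟨t, rest, rfl, hstep⟩ := pvInv_step frequency j q hpos (by push_cast at hle ⊢; omega) hinv
    have := ih (j + 1) (pvPut (t + 1) rest) hstep (by push_cast at hle ⊢; omega)
    simpa [pvRemoveLoop, Nat.add_assoc, Nat.add_comm 1 n] using this

-- the initial queue state is the characterised state for level max(frequency), r = 0
theorem pvBuild_base (frequency : List Int) (M : Int)
    (htop : ∀ f ∈ frequency, f ≤ M) :
    pvE frequency M 0 = (frequency : Multiset Int) := by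
  unfold pvE
  ext x
  simp only [Multiset.count_add, Multiset.count_filter, Multiset.count_replicate,
    Nat.sub_zero, Multiset.coe_count]
  have hcnt : pvM frequency M = frequency.count M := pvCountP_top frequency M htop
  by_cases hx1 : x = M
  · rw [hx1]
    split_ifs <;> omega
  · by_cases hx2 : x < M
    · split_ifs <;> omega
    · have hz : frequency.count x = 0 :=
        List.count_eq_zero.mpr (fun hc => by have := htop x hc; omega)
      split_ifs <;> omega

theorem pvInv_base (frequency : List Int) (M : Int)
    (htop : ∀ f ∈ frequency, f ≤ M) (hMmem : M ∈ frequency) (hM1 : 1 ≤ M) :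
    pvInv frequency 0 (frequency.foldl (fun q f => pvPut (-f) q) []) := by
  refine ⟨M, 0, hM1, ?_, ?_, pvBuild_sorted frequency, ?_⟩
  · unfold pvM
    have : frequency.countP (fun f => decide (M ≤ f)) = frequency.count M :=
      pvCountP_top frequency M htop
    have : 0 < frequency.count M := List.count_pos_iff.mpr hMmem
    omega
  · simp [pvS_top frequency htop]
  · rw [Multiset.coe_eq_coe.mpr (pvBuild_perm frequency)]
    rw [pvBuild_base frequency M htop, ← Multiset.map_coe]

-- sum of squares of the characterised multiset
theorem pvE_sumsq (frequency : List Int) (L : Int) (r : Nat) :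
    (((pvE frequency L r).map (fun x => x * x)).sum : Int)
      = ((frequency.filter (fun f => f < L)).map (fun f => f * f)).sum
        + ((pvM frequency L - r : Nat) : Int) * L ^ 2 + (r : Int) * (L - 1) ^ 2 := by
  unfold pvE
  rw [Multiset.map_add, Multiset.map_add, Multiset.sum_add, Multiset.sum_add,
    Multiset.filter_coe, Multiset.map_coe, Multiset.sum_coe,
    Multiset.map_replicate, Multiset.map_replicate, Multiset.sum_replicate,
    Multiset.sum_replicate, nsmul_eq_mul, nsmul_eq_mul]
  ring

-- a list of non-negative ints with positive sum has a positive element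
theorem pvPos_mem (l : List Int) (hpos : ∀ f ∈ l, 0 ≤ f) (hsum : 0 < l.sum) :
    ∃ f ∈ l, 0 < f := by
  induction l with
  | nil => simp at hsum
  | cons f t ih =>
    by_cases h : 0 < f
    · exact ⟨f, by simp, h⟩
    · have hf := hpos f (by simp)
      have : 0 < t.sum := by simp only [List.sum_cons] at hsum; omega
      obtain ⟨g, hg, hg'⟩ := ih (fun x hx => hpos x (by simp [hx])) this
      exact ⟨g, by simp [hg], hg'⟩

theorem minStringValue_spec' : ∀ (str : String) (k : Int),
    minStringValue str k = minStringValue_alt str k := by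
  intro str k
  unfold minStringValue minStringValue_alt
  by_cases hkl : PySem.Str.len str ≤ k
  · simp only [ge_iff_le, if_pos hkl]
  · simp only [ge_iff_le, if_neg hkl]
    cases hc : pvCount str.toList with
    | none => rfl
    | some frequency =>
      obtain ⟨hlen, hpos, hsum⟩ := pvCount_spec _ _ hc
      have hklt : k < frequency.sum := by
        rw [PySem.Str.len_eq] at hkl
        omega
      by_cases hk0 : k ≤ 0
      · simp only [if_pos hk0]
        have h0 : k.toNat = 0 := by omega
        rw [h0]
        show pvDrain (pvRemoveLoop 0 _) 0 = _
        rw [show ∀ q, pvRemoveLoop 0 q = q from fun _ => rfl, pvDrain_eq]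
        have hperm := (pvBuild_perm frequency).map (fun t => t * t)
        rw [hperm.sum_eq, List.map_map]
        simp [Function.comp_def]
      · simp only [if_neg hk0]
        -- k ≥ 1
        have hk1 : 1 ≤ k := by omega
        -- max of the frequency list
        have hne : frequency ≠ [] := by
          intro h; rw [h] at hlen; simp at hlen
        obtain ⟨M, hMeq⟩ : ∃ M, PySem.List.max? frequency (fun f => f) = some M := by
          cases h : PySem.List.max? frequency (fun f => f) with
          | none => exact absurd ((PySem.List.max?_eq_none_iff _ _).mp h) hne
          | some m => exact ⟨m, rfl⟩
        have htop : ∀ f ∈ frequency, f ≤ M := PySem.List.max?_isMax hMeq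
        have hMmem : M ∈ frequency := PySem.List.max?_mem hMeq
        have hM1 : 1 ≤ M := by
          obtain ⟨f, hf, hf'⟩ := pvPos_mem frequency hpos (by omega)
          have := htop f hf; omega
        -- A's side: run the invariant for k.toNat steps
        have hbase := pvInv_base frequency M htop hMmem hM1
        have hfin := pvRemoveLoop_inv frequency hpos k.toNat 0 _ hbase
          (by push_cast; omega)
        obtain ⟨LA, rA, hLA, hrA, hsumA, _, hmsA⟩ := hfin
        -- B's side: the binary search finds the same level
        have hMgetD : (PySem.List.max? frequency (fun f => f)).getD 0 = M := by
          rw [hMeq]; rfl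
        simp only [hMgetD]
        have hspec := pvBsearch_spec frequency k 0 M (le_refl 0) (by
            have := htop M hMmem; omega)
          (by rw [pvS_top frequency htop]; omega) (Or.inl rfl)
        have hLB0 : pvBsearch frequency k 0 M ≠ 0 := by
          intro h
          rw [h] at hspec
          rw [pvS_zero frequency hpos] at hspec
          omega
        have hLBup : k < pvS frequency (pvBsearch frequency k 0 M - 1) := by
          rcases hspec.2.2 with h | h
          · exact absurd h hLB0
          · exact h
        -- identify (LA, rA) with (LB, k - pvS LB)
        have hrB : 0 ≤ k - pvS frequency (pvBsearch frequency k 0 M) ∧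
            k - pvS frequency (pvBsearch frequency k 0 M)
              < (pvM frequency (pvBsearch frequency k 0 M) : Int) := by
          have := pvS_pred frequency (pvBsearch frequency k 0 M)
          constructor <;> omega
        have hAK : pvS frequency LA + (rA : Int) = k := by
          have : ((0 + k.toNat : Nat) : Int) = k := by omega
          omega
        obtain ⟨hLeq, hreq⟩ := pvLevel_unique frequency
          (Int.natCast_nonneg rA) (by exact_mod_cast hrA) hrB.1 hrB.2
          (by rw [hAK]; omega)
        -- A's result is the sum of squares of the characterised multiset
        rw [pvDrain_eq]
        have hmapsum : ((pvRemoveLoop k.toNat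
            (frequency.foldl (fun q f => pvPut (-f) q) [])).map (fun t => t * t)).sum
            = ((pvE frequency LA rA).map (fun x => x * x)).sum := by
          have h1 : ((pvRemoveLoop k.toNat
              (frequency.foldl (fun q f => pvPut (-f) q) []) : List Int) : Multiset Int).map
                (fun t => t * t) = ((pvE frequency LA rA).map (fun x => -x)).map (fun t => t * t) := by
            rw [hmsA]
          rw [Multiset.map_map] at h1
          have h2 : ((pvE frequency LA rA).map ((fun t => t * t) ∘ fun x => -x))
              = (pvE frequency LA rA).map (fun x => x * x) := by
            apply Multiset.map_congr rfl
            intro x _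
            simp only [Function.comp_apply]
            ring
          rw [h2] at h1
          rw [← Multiset.sum_coe, ← Multiset.map_coe, h1]
        rw [hmapsum, pvE_sumsq]
        rw [pvExcess_eq_S]
        simp only [← hLeq]
        have hcast : ((pvM frequency LA - rA : Nat) : Int)
            = (pvM frequency LA : Int) - (rA : Int) := by
          have := hrA; push_cast [Nat.cast_sub (le_of_lt hrA)]; ring
        rw [hcast]
        have hrlit : (rA : Int) = k - pvS frequency LA := by omega
        rw [hrlit]
        show _ = _ + (k - pvS frequency LA) * (LA - 1) ^ 2
          + ((↑(List.countP (fun f => decide (LA ≤ f)) frequency) - (k - pvS frequency LA)) * LA ^ 2)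
        unfold pvM
        ring

-- ===== VERDICT (by name: the statement is the Claim_ definition above) =====
theorem minStringValue_spec : Claim_equal_minStringValue := by
  intro str k _ _
  exact minStringValue_spec' str k
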